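-- pv_equiv track=rewrite | github.com/CharlesLB/farm-optimizer | utils/month.py | getPlantMonth
-- ===== SOURCE A (Python) =====
-- def getPlantMonth(month, tempo_de_frutificacao):
--     positions = 11
--     result = month - tempo_de_frutificacao
--
--     if result < 0:
--         while result < 0:
--             result += positions + 1
--
--         return result
--
--     return result
-- ===== SOURCE B (Python) =====
-- def getPlantMonth(month, tempo_de_frutificacao):
--     result = month - tempo_de_frutificacao
--     if result < 0:
--         return result % 12
--     return result
-- ===== Notes on version B (the rewrite author's own statement) =====
-- stated objective: simpler
-- what changed: Replaces the while-loop that repeatedly adds 12 to a negative result with a single closed-form modulo, keeping the non-negative branch unwrapped.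
import Mathlib
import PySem

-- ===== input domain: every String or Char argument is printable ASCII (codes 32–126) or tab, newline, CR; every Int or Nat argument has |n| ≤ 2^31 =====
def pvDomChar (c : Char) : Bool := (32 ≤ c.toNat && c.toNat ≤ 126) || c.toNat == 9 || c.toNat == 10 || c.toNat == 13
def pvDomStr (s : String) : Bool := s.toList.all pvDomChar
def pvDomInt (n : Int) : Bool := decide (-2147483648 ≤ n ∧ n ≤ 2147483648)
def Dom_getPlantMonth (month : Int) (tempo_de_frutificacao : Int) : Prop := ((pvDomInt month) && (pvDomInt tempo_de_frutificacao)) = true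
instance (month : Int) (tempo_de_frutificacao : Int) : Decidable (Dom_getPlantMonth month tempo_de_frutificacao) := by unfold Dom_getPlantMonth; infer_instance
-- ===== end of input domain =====

-- B replaces A's while-loop (repeatedly add 12 while negative) with one closed-form modulo: simpler, constant-time.

-- ===== PORT A =====
-- the 'while result < 0: result += positions + 1' loop, with positions + 1 = 12
def getPlantMonthWrap (result : Int) : Int :=
  if h : result < 0 then getPlantMonthWrap (result + 12) else result
termination_by (-result).toNat
decreasing_by omega

def getPlantMonth (month : Int) (tempo_de_frutificacao : Int) : Int :=
  let result := month - tempo_de_frutificacao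
  if result < 0 then getPlantMonthWrap result else result

-- ===== PORT B =====
def getPlantMonth_alt (month : Int) (tempo_de_frutificacao : Int) : Int :=
  let result := month - tempo_de_frutificacao
  if result < 0 then PySem.Int.mod result 12 else result

-- ===== PRECONDITION & SPEC =====
def Spec_getPlantMonth (month : Int) (tempo_de_frutificacao : Int) (out : Int) : Prop := out = getPlantMonth_alt month tempo_de_frutificacao
instance (month : Int) (tempo_de_frutificacao : Int) (out : Int) : Decidable (Spec_getPlantMonth month tempo_de_frutificacao out) := by unfold Spec_getPlantMonth; infer_instance

-- ===== CLAIM (what is proved, stated in full; the proofs are below) =====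
def Claim_equal_getPlantMonth : Prop := ∀ (month : Int) (tempo_de_frutificacao : Int), Dom_getPlantMonth month tempo_de_frutificacao → Spec_getPlantMonth month tempo_de_frutificacao (getPlantMonth month tempo_de_frutificacao)

-- ===== LEMMAS AND PROOFS =====
theorem getPlantMonthWrap_eq_emod (result : Int) (h : result < 0) :
    getPlantMonthWrap result = result % 12 := by
  rw [getPlantMonthWrap]
  simp only [h, dite_true]
  by_cases h2 : result + 12 < 0
  · rw [getPlantMonthWrap_eq_emod _ h2]; omega
  · rw [getPlantMonthWrap]
    simp only [h2, dite_false]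
    omega
termination_by (-result).toNat
decreasing_by omega

-- ===== VERDICT (by name: the statement is the Claim_ definition above) =====
theorem getPlantMonth_spec : Claim_equal_getPlantMonth := by
  intro month tempo _
  unfold Spec_getPlantMonth getPlantMonth getPlantMonth_alt
  simp only []
  by_cases h : month - tempo < 0
  · simp only [h, if_true]
    rw [getPlantMonthWrap_eq_emod _ h, PySem.Int.mod_eq_emod_of_pos (by norm_num)]
  · simp [h]
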